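-- pv_equiv track=rewrite | github.com/KondaveeteChennakesava/owlCoding | Medium/Check if frequencies can be equal/check-if-frequencies-can-be-equal.py | sameFreq
-- ===== SOURCE A (Python) =====
-- def sameFreq(s):
--     # code here
--     dic = {}
--     for i in s:
--         if i not in dic:
--             dic[i] = 1
--         else:
--             dic[i] += 1
--     arr = list(dic.values())
--     if len(set(arr)) == 1:
--         return 1
--     for i in range(len(arr)):
--         arr[i] -= 1
--         if len(set(arr)) == 1 or (len(set(arr)) == 2 and 0 in set(arr)):
--             return 1
--         arr[i] += 1
--     return 0
-- ===== SOURCE B (Python) =====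
-- def sameFreq(s):
--     # count characters, then decide by case analysis on the distinct count
--     # values and their multiplicities (no decrement/restore loop)
--     cnt = {}
--     for ch in s:
--         cnt[ch] = cnt.get(ch, 0) + 1
--     freq = {}
--     for v in cnt.values():
--         freq[v] = freq.get(v, 0) + 1
--     vals = sorted(freq)
--     if len(vals) == 1:
--         return 1
--     if len(vals) == 2:
--         v1, v2 = vals
--         if v2 == v1 + 1 and freq[v2] == 1:
--             return 1
--         if v1 == 1 and freq[v1] == 1:
--             return 1
--     return 0
-- ===== Notes on version B (the rewrite author's own statement) =====
-- stated objective: simpler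
-- what changed: Replaces A's decrement/restore trial loop (which rebuilds set(arr) for every index) by a direct case analysis on the sorted distinct count values and a frequency-of-frequencies map.
import Mathlib
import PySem

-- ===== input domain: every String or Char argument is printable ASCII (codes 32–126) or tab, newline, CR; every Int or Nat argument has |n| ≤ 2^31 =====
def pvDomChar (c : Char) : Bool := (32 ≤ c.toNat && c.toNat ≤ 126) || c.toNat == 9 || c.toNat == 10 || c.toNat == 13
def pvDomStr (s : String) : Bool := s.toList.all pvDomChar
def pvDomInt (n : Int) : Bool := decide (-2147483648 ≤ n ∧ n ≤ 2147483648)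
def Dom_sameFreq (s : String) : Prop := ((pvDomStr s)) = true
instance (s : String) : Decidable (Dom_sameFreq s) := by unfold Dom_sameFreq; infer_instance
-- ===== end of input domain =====

-- B replaces A's decrement/restore trial loop by a direct case analysis on the
-- sorted distinct count values and a frequency-of-frequencies map (simpler).

-- ===== PORT A =====
-- len(set(arr))==1 or (len(set(arr))==2 and 0 in set(arr))
def condA (b : List Int) : Bool :=
  (PySem.Set.ofList b).length == 1 ||
    ((PySem.Set.ofList b).length == 2 && PySem.Set.contains (PySem.Set.ofList b) 0)

-- the 'for i in range(len(arr))' loop with early return; arr[i] is decremented,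
-- tested, and restored exactly as in A
def loopA : List Int → List Nat → Int
  | _, [] => 0
  | arr, i :: rest =>
    let arr1 := arr.set i (arr.getD i 0 - 1)
    if condA arr1 then 1
    else loopA (arr1.set i (arr1.getD i 0 + 1)) rest

def sameFreq (s : String) : Int :=
  let dic := s.toList.foldl
    (fun d c => if d.contains c then d.insert c (d.getD c 0 + 1) else d.insert c 1)
    (PySem.Dict.empty : PySem.Dict Char Int)
  let arr := dic.values
  if (PySem.Set.ofList arr).length == 1 then 1
  else loopA arr (List.range arr.length)

-- ===== PORT B =====
def sameFreq_alt (s : String) : Int :=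
  let cnt := s.toList.foldl (fun d c => d.insert c (d.getD c 0 + 1))
    (PySem.Dict.empty : PySem.Dict Char Int)
  let freq := cnt.values.foldl (fun d v => d.insert v (d.getD v 0 + 1))
    (PySem.Dict.empty : PySem.Dict Int Int)
  let vals := PySem.List.sorted freq.keys (fun x => x) false
  if vals.length == 1 then 1
  else
    match vals with
    | [v1, v2] =>
      if v2 == v1 + 1 && freq.getD v2 0 == 1 then 1
      else if v1 == 1 && freq.getD v1 0 == 1 then 1
      else 0
    | _ => 0

-- ===== PRECONDITION & SPEC =====
def Spec_sameFreq (s : String) (out : Int) : Prop := out = sameFreq_alt s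
instance (s : String) (out : Int) : Decidable (Spec_sameFreq s out) := by unfold Spec_sameFreq; infer_instance

-- ===== CLAIM (what is proved, stated in full; the proofs are below) =====
def Claim_equal_sameFreq : Prop := ∀ (s : String), Dom_sameFreq s → Spec_sameFreq s (sameFreq s)

-- ===== LEMMAS AND PROOFS =====

-- A's counting loop builds the same dict as the plain get-default counting loop
lemma buildA_eq_counter (cs : List Char) :
    cs.foldl
      (fun d c => if d.contains c then d.insert c (d.getD c 0 + 1) else d.insert c 1)
      (PySem.Dict.empty : PySem.Dict Char Int) = PySem.Dict.counter cs := by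
  rw [← PySem.Dict.foldl_insert_getD_add_one_eq_counter]
  congr 1
  funext d c
  cases h : d.contains c with
  | true => simp
  | false => rw [PySem.Dict.getD_of_not_contains d 0 h]; simp

-- len(set(b)) is the Finset cardinality of b
lemma setOfList_length (b : List Int) :
    (PySem.Set.ofList b).length = b.toFinset.card := by
  have h1 : (PySem.Set.ofList b).toFinset = b.toFinset := by
    ext x; simp [PySem.Set.mem_ofList]
  rw [← h1, List.toFinset_card_of_nodup (PySem.Set.nodup_ofList b)]

lemma condA_iff (b : List Int) :
    condA b = true ↔ (b.toFinset.card = 1 ∨ (b.toFinset.card = 2 ∧ (0:Int) ∈ b)) := by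
  simp [condA, setOfList_length, PySem.Set.mem_ofList]

-- occurrence count after overwriting position n
lemma count_set_of_lt (l : List Int) (n : Nat) (h : n < l.length) (w x : Int) :
    (l.set n w).count x =
      l.count x + (if w = x then 1 else 0) - (if l[n] = x then 1 else 0) := by
  have hc : l.count x = (l.take n).count x + ((if l[n] = x then 1 else 0) + (l.drop (n+1)).count x) := by
    conv_lhs => rw [← List.take_append_drop n l, ← List.getElem_cons_drop h]
    rw [List.count_append, List.count_cons]
    simp only [beq_iff_eq]
    omega
  rw [List.set_eq_take_append_cons_drop, if_pos h, hc, List.count_append, List.count_cons]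
  simp only [beq_iff_eq]
  split_ifs <;> omega

-- A's trial loop is a search for an index whose decrement passes condA
lemma loopA_eq (idx : List Nat) (arr : List Int) (h : ∀ i ∈ idx, i < arr.length) :
    loopA arr idx =
      if idx.any (fun i => condA (arr.set i (arr.getD i 0 - 1))) then 1 else 0 := by
  induction idx with
  | nil => simp [loopA]
  | cons i rest ih =>
    have hi : i < arr.length := h i (List.mem_cons_self)
    have hlen : i < (arr.set i (arr.getD i 0 - 1)).length := by simpa using hi
    have hrestore : ((arr.set i (arr.getD i 0 - 1)).set i
        ((arr.set i (arr.getD i 0 - 1)).getD i 0 + 1)) = arr := by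
      rw [List.getD_eq_getElem _ _ hlen, List.getElem_set_self, List.set_set]
      have h2 : arr.getD i 0 - 1 + 1 = arr[i] := by
        rw [List.getD_eq_getElem arr 0 hi]; ring
      rw [h2]
      exact List.set_getElem_self hi
    simp only [loopA, hrestore, List.any_cons]
    by_cases hc : condA (arr.set i (arr.getD i 0 - 1)) = true
    · simp only [hc, if_pos, Bool.true_or]
    · rw [Bool.not_eq_true] at hc
      have hc' : condA (arr.set i (arr[i]?.getD 0 - 1)) = false := hc
      simp only [hc, Bool.false_or, Bool.false_eq_true, if_false]
      exact ih (fun k hk => h k (List.mem_cons_of_mem _ hk))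

-- with ≥ 3 distinct counts no single decrement can equalize
lemma condA_dec_false_of_three (arr : List Int) (hpos : ∀ x ∈ arr, 1 ≤ x)
    (hcard : 3 ≤ arr.toFinset.card) (j : Nat) (hj : j < arr.length) :
    condA (arr.set j (arr.getD j 0 - 1)) = false := by
  rw [List.getD_eq_getElem arr 0 hj]
  by_contra hne
  rw [Bool.not_eq_false, condA_iff] at hne
  have hmemb : ∀ x ∈ arr, x ≠ arr[j] → x ∈ arr.set j (arr[j] - 1) := by
    intro x hx hxa
    obtain ⟨k, hk, hke⟩ := List.mem_iff_getElem.mp hx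
    have hkj : k ≠ j := by rintro rfl; exact hxa hke.symm
    refine List.mem_iff_getElem.mpr ⟨k, by simpa using hk, ?_⟩
    rw [List.getElem_set, if_neg (fun hh => hkj hh.symm)]
    exact hke
  have hsub : arr.toFinset.erase arr[j] ⊆ (arr.set j (arr[j] - 1)).toFinset := by
    intro x hx
    rw [Finset.mem_erase, List.mem_toFinset] at hx
    exact List.mem_toFinset.mpr (hmemb x hx.2 hx.1)
  have hamem : arr[j] ∈ arr.toFinset := List.mem_toFinset.mpr (List.getElem_mem hj)
  have hcarde : (arr.toFinset.erase arr[j]).card = arr.toFinset.card - 1 :=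
    Finset.card_erase_of_mem hamem
  rcases hne with h1 | ⟨h2', h0⟩
  · have := Finset.card_le_card hsub
    omega
  · have h0f : (0:Int) ∈ (arr.set j (arr[j] - 1)).toFinset := List.mem_toFinset.mpr h0
    have h0notin : (0:Int) ∉ arr.toFinset.erase arr[j] := by
      intro hmem
      have := hpos 0 (List.mem_toFinset.mp (Finset.mem_of_mem_erase hmem))
      omega
    have hsub2 : insert (0:Int) (arr.toFinset.erase arr[j]) ⊆ (arr.set j (arr[j] - 1)).toFinset := by
      intro x hx
      rcases Finset.mem_insert.mp hx with rfl | hx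
      · exact h0f
      · exact hsub hx
    have := Finset.card_le_card hsub2
    rw [Finset.card_insert_of_notMem h0notin] at this
    omega

-- with exactly two distinct counts v1 < v2, a decrement works iff one of B's two rules holds
lemma exists_dec_iff_two (arr : List Int) (hpos : ∀ x ∈ arr, 1 ≤ x) (v1 v2 : Int)
    (hlt : v1 < v2) (hfin : arr.toFinset = {v1, v2}) :
    ((List.range arr.length).any
        (fun j => condA (arr.set j (arr.getD j 0 - 1))) = true) ↔
      ((v2 = v1 + 1 ∧ arr.count v2 = 1) ∨ (v1 = 1 ∧ arr.count v1 = 1)) := by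
  have hmem : ∀ x ∈ arr, x = v1 ∨ x = v2 := by
    intro x hx
    have hx' : x ∈ arr.toFinset := List.mem_toFinset.mpr hx
    rw [hfin] at hx'; simpa using hx'
  have hv1 : v1 ∈ arr := List.mem_toFinset.mp (by rw [hfin]; simp)
  have hv2 : v2 ∈ arr := List.mem_toFinset.mp (by rw [hfin]; simp)
  have h1le : (1:Int) ≤ v1 := hpos v1 hv1
  have hc1 : 0 < arr.count v1 := List.count_pos_iff.mpr hv1
  have hc2 : 0 < arr.count v2 := List.count_pos_iff.mpr hv2
  have hcount0 : ∀ x : Int, x ≠ v1 → x ≠ v2 → arr.count x = 0 := by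
    intro x h1 h2
    rw [List.count_eq_zero]
    intro hx; rcases hmem x hx with rfl | rfl
    · exact h1 rfl
    · exact h2 rfl
  rw [List.any_eq_true]
  constructor
  · rintro ⟨j, hjr, hcj⟩
    rw [List.mem_range] at hjr
    rw [List.getD_eq_getElem arr 0 hjr, condA_iff] at hcj
    have hcnt := fun x => count_set_of_lt arr j hjr (arr[j] - 1) x
    rcases hmem _ (List.getElem_mem hjr) with hej | hej <;> rw [hej] at hcj hcnt
    · -- decremented a v1 occurrence: derive rule 2
      right
      have hbv2 : v2 ∈ arr.set j (v1 - 1) := by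
        apply List.count_pos_iff.mp
        rw [hcnt v2, if_neg (by omega), if_neg (by omega)]
        omega
      have hbv11 : v1 - 1 ∈ arr.set j (v1 - 1) := by
        apply List.count_pos_iff.mp
        rw [hcnt (v1-1), if_pos rfl, if_neg (by omega)]
        omega
      rcases hcj with hcard1 | ⟨hcard2, h0b⟩
      · exfalso
        obtain ⟨u, hbe⟩ := Finset.card_eq_one.mp hcard1
        have e1 : v2 = u := by
          have := List.mem_toFinset.mpr hbv2; rw [hbe] at this; simpa using this
        have e2 : v1 - 1 = u := by
          have := List.mem_toFinset.mpr hbv11; rw [hbe] at this; simpa using this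
        omega
      · have hv1e : v1 = 1 := by
          have h0c : 0 < (arr.set j (v1-1)).count 0 := List.count_pos_iff.mpr h0b
          rw [hcnt 0] at h0c
          by_contra hne
          rw [hcount0 0 (by omega) (by omega), if_neg (by omega), if_neg (by omega)] at h0c
          omega
        refine ⟨hv1e, ?_⟩
        by_contra hne
        have hge2 : 2 ≤ arr.count v1 := by omega
        have hv1b : v1 ∈ arr.set j (v1 - 1) := by
          apply List.count_pos_iff.mp
          rw [hcnt v1, if_neg (by omega), if_pos rfl]
          omega
        obtain ⟨x, y, hxy, hbe⟩ := Finset.card_eq_two.mp hcard2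
        have m0 : (0:Int) = x ∨ (0:Int) = y := by
          have := List.mem_toFinset.mpr h0b; rw [hbe] at this; simpa using this
        have mv1 : v1 = x ∨ v1 = y := by
          have := List.mem_toFinset.mpr hv1b; rw [hbe] at this; simpa using this
        have mv2 : v2 = x ∨ v2 = y := by
          have := List.mem_toFinset.mpr hbv2; rw [hbe] at this; simpa using this
        rcases m0 with h | h <;> rcases mv1 with h' | h' <;> rcases mv2 with h'' | h'' <;> omega
    · -- decremented a v2 occurrence: derive rule 1
      left
      have hbv1 : v1 ∈ arr.set j (v2 - 1) := by
        apply List.count_pos_iff.mp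
        rw [hcnt v1]
        split_ifs <;> omega
      have hb21 : v2 - 1 ∈ arr.set j (v2 - 1) := by
        apply List.count_pos_iff.mp
        rw [hcnt (v2-1), if_pos rfl, if_neg (by omega)]
        omega
      have h0nb : (0:Int) ∉ arr.set j (v2 - 1) := by
        rw [← List.count_eq_zero, hcnt 0, hcount0 0 (by omega) (by omega),
          if_neg (by omega), if_neg (by omega)]
      rcases hcj with hcard1 | ⟨_, h0b⟩
      · obtain ⟨u, hbe⟩ := Finset.card_eq_one.mp hcard1
        have e1 : v1 = u := by
          have := List.mem_toFinset.mpr hbv1; rw [hbe] at this; simpa using this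
        have e2 : v2 - 1 = u := by
          have := List.mem_toFinset.mpr hb21; rw [hbe] at this; simpa using this
        refine ⟨by omega, ?_⟩
        by_contra hne
        have hge2 : 2 ≤ arr.count v2 := by omega
        have hv2b : v2 ∈ arr.set j (v2 - 1) := by
          apply List.count_pos_iff.mp
          rw [hcnt v2, if_neg (by omega), if_pos rfl]
          omega
        have : v2 = u := by
          have := List.mem_toFinset.mpr hv2b; rw [hbe] at this; simpa using this
        omega
      · exact absurd h0b h0nb
  · rintro (⟨hv2e, hc2e⟩ | ⟨hv1e, hc1e⟩)
    · -- rule 1: decrement the single v2 occurrence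
      obtain ⟨j, hjr, hje⟩ := List.mem_iff_getElem.mp hv2
      refine ⟨j, List.mem_range.mpr hjr, ?_⟩
      rw [List.getD_eq_getElem arr 0 hjr, hje, condA_iff]
      left
      have hcnt := fun x => count_set_of_lt arr j hjr (v2 - 1) x
      rw [hje] at hcnt
      have hbe : (arr.set j (v2 - 1)).toFinset = {v1} := by
        apply Finset.ext
        intro x
        simp only [List.mem_toFinset, Finset.mem_singleton]
        constructor
        · intro hx
          have h0c := List.count_pos_iff.mpr hx
          rw [hcnt x] at h0c
          by_contra hxne
          by_cases hxv2 : x = v2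
          · subst hxv2
            rw [if_neg (by omega), if_pos rfl] at h0c
            omega
          · rw [hcount0 x hxne hxv2, if_neg (by omega), if_neg (by omega)] at h0c
            omega
        · intro hx
          rw [hx]
          apply List.count_pos_iff.mp
          rw [hcnt v1, if_pos (by omega), if_neg (by omega)]
          omega
      rw [hbe]
      simp
    · -- rule 2: decrement the single v1 = 1 occurrence
      obtain ⟨j, hjr, hje⟩ := List.mem_iff_getElem.mp hv1
      refine ⟨j, List.mem_range.mpr hjr, ?_⟩
      rw [List.getD_eq_getElem arr 0 hjr, hje, condA_iff]
      right
      have hcnt := fun x => count_set_of_lt arr j hjr (v1 - 1) x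
      rw [hje] at hcnt
      have h0b : (0:Int) ∈ arr.set j (v1 - 1) := by
        apply List.count_pos_iff.mp
        rw [hcnt 0, hcount0 0 (by omega) (by omega), if_pos (by omega), if_neg (by omega)]
        omega
      refine ⟨?_, h0b⟩
      have hbe : (arr.set j (v1 - 1)).toFinset = {0, v2} := by
        apply Finset.ext
        intro x
        simp only [List.mem_toFinset, Finset.mem_insert, Finset.mem_singleton]
        constructor
        · intro hx
          have h0c := List.count_pos_iff.mpr hx
          rw [hcnt x] at h0c
          by_contra hxne
          rw [not_or] at hxne
          by_cases hxv1 : x = v1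
          · subst hxv1
            rw [if_neg (by omega), if_pos rfl] at h0c
            omega
          · rw [hcount0 x hxv1 (by exact hxne.2), if_neg (by omega), if_neg (by omega)] at h0c
            omega
        · rintro (hx | hx) <;> rw [hx]
          · exact h0b
          · apply List.count_pos_iff.mp
            rw [hcnt v2, if_neg (by omega), if_neg (by omega)]
            omega
      rw [hbe]
      rw [Finset.card_insert_of_notMem (by simp; omega), Finset.card_singleton]

-- the common core: both decision procedures agree on any list of positive counts
lemma core_eq (arr : List Int) (hpos : ∀ x ∈ arr, 1 ≤ x) :
    (if (PySem.Set.ofList arr).length == 1 then (1:Int)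
     else loopA arr (List.range arr.length)) =
    (let freq := PySem.Dict.counter arr
     let vals := PySem.List.sorted freq.keys (fun x => x) false
     if vals.length == 1 then (1:Int)
     else
       match vals with
       | [v1, v2] =>
         if v2 == v1 + 1 && freq.getD v2 0 == 1 then 1
         else if v1 == 1 && freq.getD v1 0 == 1 then 1
         else 0
       | _ => 0) := by
  have hrange : ∀ i ∈ List.range arr.length, i < arr.length := by
    intro i hi; exact List.mem_range.mp hi
  show _ =
    (if (PySem.List.sorted (PySem.Dict.counter arr).keys (fun x => x) false).length == 1 then (1:Int)
     else
       match PySem.List.sorted (PySem.Dict.counter arr).keys (fun x => x) false with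
       | [v1, v2] =>
         if v2 == v1 + 1 && (PySem.Dict.counter arr).getD v2 0 == 1 then 1
         else if v1 == 1 && (PySem.Dict.counter arr).getD v1 0 == 1 then 1
         else 0
       | _ => 0)
  set vals := PySem.List.sorted (PySem.Dict.counter arr).keys (fun x => x) false with hvals
  have hperm : vals.Perm (PySem.Set.ofList arr) := by
    rw [hvals, PySem.Dict.keys_counter]
    exact PySem.List.sorted_perm _ _ _
  have hlenv : vals.length = (PySem.Set.ofList arr).length := hperm.length_eq
  have hnd : vals.Nodup := hperm.nodup_iff.mpr (PySem.Set.nodup_ofList arr)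
  have hpw : vals.Pairwise (fun x y => x ≤ y) := by
    rw [hvals]
    exact PySem.List.sorted_pairwise (PySem.Dict.counter arr).keys (fun x => x)
  have hmemv : ∀ x, x ∈ vals ↔ x ∈ arr := by
    intro x
    rw [hperm.mem_iff, PySem.Set.mem_ofList]
  clear hvals
  rcases vals with _ | ⟨a, _ | ⟨b, _ | ⟨c, rest⟩⟩⟩
  · -- no distinct values: arr = []
    have harr : arr = [] := by
      rw [List.eq_nil_iff_forall_not_mem]
      intro x hx
      exact (List.not_mem_nil (a := x)) ((hmemv x).mpr hx)
    subst harr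
    rfl
  · -- one distinct value
    have hS1 : (PySem.Set.ofList arr).length = 1 := by simpa using hlenv.symm
    rw [hS1]
    rfl
  · -- two distinct values a < b
    have hS2 : (PySem.Set.ofList arr).length = 2 := by simpa using hlenv.symm
    have hab : a < b := by
      have h1 : a ≠ b := by simp at hnd; exact hnd
      have h2 : a ≤ b := by simp at hpw; exact hpw
      omega
    have hfin : arr.toFinset = {a, b} := by
      ext x
      rw [List.mem_toFinset, ← hmemv x]
      simp
    have hiff := exists_dec_iff_two arr hpos a b hab hfin
    rw [hS2, loopA_eq (List.range arr.length) arr hrange]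
    rw [show ((2:Nat) == 1) = false from rfl]
    rw [show (([a, b] : List Int).length == 1) = false from rfl]
    simp only [Bool.false_eq_true, if_false]
    rw [PySem.Dict.getD_counter, PySem.Dict.getD_counter]
    by_cases hany : ((List.range arr.length).any
        (fun j => condA (arr.set j (arr.getD j 0 - 1))) = true)
    · rw [if_pos hany]
      rcases hiff.mp hany with ⟨hr1, hr2⟩ | ⟨hr1, hr2⟩
      · have hbtrue : (b == a + 1 && ((List.count b arr : Int)) == 1) = true := by
          rw [hr2]; simp [hr1]
        simp [hbtrue]
      · by_cases hb : (b == a + 1 && ((List.count b arr : Int)) == 1) = true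
        · simp [hb]
        · rw [Bool.not_eq_true] at hb
          have hatrue : (a == 1 && ((List.count a arr : Int)) == 1) = true := by
            rw [hr2]; simp [hr1]
          simp [hb, hatrue]
    · rw [Bool.not_eq_true] at hany
      have hno := hiff.not.mp (by rw [hany]; simp)
      rw [not_or] at hno
      have hb : (b == a + 1 && ((List.count b arr : Int)) == 1) = false := by
        by_contra hx
        rw [Bool.not_eq_false, Bool.and_eq_true, beq_iff_eq, beq_iff_eq, Nat.cast_eq_one] at hx
        exact hno.1 hx
      have ha : (a == 1 && ((List.count a arr : Int)) == 1) = false := by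
        by_contra hx
        rw [Bool.not_eq_false, Bool.and_eq_true, beq_iff_eq, beq_iff_eq, Nat.cast_eq_one] at hx
        exact hno.2 hx
      simp only [hany, Bool.false_eq_true, if_false]
      simp [hb, ha]
  · -- three or more distinct values
    have hS3 : 3 ≤ arr.toFinset.card := by
      rw [← setOfList_length, ← hlenv]
      simp only [List.length_cons]
      omega
    rw [loopA_eq (List.range arr.length) arr hrange]
    have hany : ((List.range arr.length).any
        (fun j => condA (arr.set j (arr.getD j 0 - 1)))) = false := by
      rw [List.any_eq_false]
      intro j hj
      rw [condA_dec_false_of_three arr hpos hS3 j (List.mem_range.mp hj)]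
      exact Bool.false_ne_true
    rw [hany]
    have hlen0 : (PySem.Set.ofList arr).length = rest.length + 3 := by
      rw [← hlenv]; simp only [List.length_cons]
    simp [hlen0]

-- ===== VERDICT (by name: the statement is the Claim_ definition above) =====
theorem sameFreq_spec : Claim_equal_sameFreq := by
  intro s _
  show sameFreq s = sameFreq_alt s
  have hpos : ∀ x ∈ (PySem.Dict.counter s.toList).values, (1:Int) ≤ x := by
    intro x hx
    rw [PySem.Dict.values_eq_map_keys _ (PySem.Dict.nodup_keys_counter _) 0] at hx
    obtain ⟨k, hk, rfl⟩ := List.mem_map.mp hx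
    rw [PySem.Dict.getD_counter]
    have : k ∈ s.toList := (PySem.Set.mem_ofList _ _).mp (by
      rwa [PySem.Dict.keys_counter] at hk)
    have : 0 < List.count k s.toList := List.count_pos_iff.mpr this
    omega
  simp only [sameFreq, sameFreq_alt, buildA_eq_counter,
    PySem.Dict.foldl_insert_getD_add_one_eq_counter]
  exact core_eq _ hpos
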